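-- pv_equiv track=rewrite | github.com/vterreno/ejercicios-curso-python | Ejercicios/Ejercicio #16 - Volumen 4 - 400 - Durmiendo en albergues/AbrilCarballo.py | leer_der
-- ===== SOURCE A (Python) =====
-- def leer_der(camas): # x.....
--     total_der = -1
--     for i in range(len(camas) - 1, -1, -1):
--         if camas[i] == ".":
--             total_der += 1
--         if camas[i] == "x":
--             return total_der
--     return total_der
-- ===== SOURCE B (Python) =====
-- def leer_der(camas):
--     idx = camas.rfind('x')
--     return camas.count('.', idx + 1) - 1
-- ===== Notes on version B (the rewrite author's own statement) =====
-- stated objective: simpler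
-- what changed: Replaces A's fused right-to-left scan with mutable accumulator and early return by a locate-then-count decomposition: rfind the rightmost 'x', then count dots in the tail after it, minus 1.
import Mathlib
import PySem

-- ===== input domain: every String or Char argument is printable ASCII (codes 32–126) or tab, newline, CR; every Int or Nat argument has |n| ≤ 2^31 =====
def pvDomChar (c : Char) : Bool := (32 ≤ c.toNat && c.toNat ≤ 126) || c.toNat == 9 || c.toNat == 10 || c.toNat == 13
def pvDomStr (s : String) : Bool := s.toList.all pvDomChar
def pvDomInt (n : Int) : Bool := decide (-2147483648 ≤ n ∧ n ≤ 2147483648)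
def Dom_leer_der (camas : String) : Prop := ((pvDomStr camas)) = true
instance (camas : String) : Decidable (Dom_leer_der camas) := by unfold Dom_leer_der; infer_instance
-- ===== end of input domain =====

-- B replaces A's fused right-to-left scan (accumulator + early return) by a
-- locate-then-count decomposition (rfind the rightmost 'x', count dots after it, minus 1): simpler.


-- ===== PORT A =====
-- the for-loop over range(len-1,-1,-1) with early return, as recursion over the reversed char list
def leerDerLoop : List Char → Int → Int
  | [], acc => acc
  | c :: rest, acc =>
    let acc := if c = '.' then acc + 1 else acc
    if c = 'x' then acc else leerDerLoop rest acc

def leer_der (camas : String) : Int := leerDerLoop camas.toList.reverse (-1)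

-- ===== PORT B =====
-- camas.rfind('x'): hand port, exact for a single-char needle (index of last occurrence, -1 if absent)
def pyRFindX (l : List Char) : Int :=
  match l.reverse.findIdx? (· = 'x') with
  | some j => (l.length : Int) - 1 - j
  | none => -1

-- camas.count('.', start): hand port, exact for a single-char needle and 0 ≤ start
def leer_der_alt (camas : String) : Int :=
  let idx := pyRFindX camas.toList
  ((camas.toList.drop (idx + 1).toNat).count '.' : Int) - 1

-- ===== PRECONDITION & SPEC =====
def Spec_leer_der (camas : String) (out : Int) : Prop := out = leer_der_alt camas
instance (camas : String) (out : Int) : Decidable (Spec_leer_der camas out) := by unfold Spec_leer_der; infer_instance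

-- ===== CLAIM (what is proved, stated in full; the proofs are below) =====
def Claim_equal_leer_der : Prop := ∀ (camas : String), Dom_leer_der camas → Spec_leer_der camas (leer_der camas)

-- ===== LEMMAS AND PROOFS =====
-- the Bool predicate "is not 'x'", in the normal form simp produces
def pX : Char → Bool := fun c => !(c = 'x')

theorem leerDerLoop_spec (r : List Char) (acc : Int) :
    leerDerLoop r acc = acc + ((r.takeWhile pX).count '.' : Int) := by
  induction r generalizing acc with
  | nil => simp [leerDerLoop]
  | cons c rest ih =>
    by_cases hx : c = 'x'
    · subst hx; simp [leerDerLoop, List.takeWhile, pX]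
    · by_cases hd : c = '.'
      · subst hd
        simp [leerDerLoop, List.takeWhile, pX, hx, ih]
        ring
      · simp [leerDerLoop, List.takeWhile, pX, hx, hd, ih]

theorem takeWhile_eq_take_of (p : Char → Bool) (l : List Char) (j : Nat)
    (h1 : ∀ (i : Nat) (_hi : i < j), ∃ (hl : i < l.length), p (l[i]'hl) = true)
    (h2 : ∀ (hl : j < l.length), p (l[j]'hl) = false) :
    l.takeWhile p = l.take j := by
  induction l generalizing j with
  | nil => simp
  | cons c rest ih =>
    cases j with
    | zero =>
      have := h2 (by simp)
      simp at this
      simp [List.takeWhile, this]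
    | succ j' =>
      have hc : p c = true := by
        obtain ⟨_, hp⟩ := h1 0 (Nat.succ_pos j')
        simpa using hp
      have htail : rest.takeWhile p = rest.take j' := by
        apply ih
        · intro i hi
          obtain ⟨hl, hp⟩ := h1 (i + 1) (by omega)
          exact ⟨by simpa using hl, by simpa using hp⟩
        · intro hl
          have := h2 (by simpa using Nat.succ_lt_succ hl)
          simpa using this
      simp [List.takeWhile, hc, htail]

theorem core_eq (l : List Char) :
    leerDerLoop l.reverse (-1)
      = ((l.drop ((pyRFindX l + 1).toNat)).count '.' : Int) - 1 := by
  rw [leerDerLoop_spec]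
  unfold pyRFindX
  cases hf : l.reverse.findIdx? (· = 'x') with
  | none =>
    have htw : l.reverse.takeWhile pX = l.reverse := by
      apply List.takeWhile_eq_self_iff.mpr
      intro c hc
      have := List.findIdx?_eq_none_iff.mp hf
      have hnx := this c hc
      simp at hnx
      simp [pX, hnx]
    rw [htw]
    simp [List.count_reverse]
    ring
  | some j =>
    rcases List.findIdx?_eq_some_iff_getElem.mp hf with ⟨hj, hget, hbefore⟩
    have hjl : j < l.length := by simpa using hj
    have hgetx : l.reverse[j]'hj = 'x' := by simpa using hget
    have htake : l.reverse.takeWhile pX = l.reverse.take j := by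
      apply takeWhile_eq_take_of
      · intro i hi
        refine ⟨by omega, ?_⟩
        have := hbefore i hi
        simp at this
        simp [pX, this]
      · intro hl
        simp [pX, hgetx]
    have hcast : ((l.length : Int) - 1 - j + 1).toNat = l.length - j := by omega
    rw [htake, hcast]
    have hdrop : (l.drop (l.length - j)).reverse = l.reverse.take j := by
      rw [List.reverse_drop]
      congr 1
      omega
    rw [← hdrop, List.count_reverse]
    ring

-- ===== VERDICT (by name: the statement is the Claim_ definition above) =====
theorem leer_der_spec : Claim_equal_leer_der := by
  intro camas _
  unfold Spec_leer_der leer_der leer_der_alt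
  exact core_eq camas.toList
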